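-- pv_equiv track=rewrite | github.com/PennShenLab/mref-ad | analysis/missing_modality/plot_missingness.py | _order_models
-- ===== SOURCE A (Python) =====
-- import string
-- from typing import Tuple, List
--
-- def _canonical_label(label: str) -> str:
--     """Return a canonicalized version of the label for ordering."""
--     s = label.lower()
--     s = s.replace("-", "").replace("_", "")
--     s = "".join(ch for ch in s if ch not in string.punctuation and not ch.isspace())
--     return s
--
-- def _order_models(labels: List[str], inputs: List[List[str]]) -> Tuple[List[str], List[List[str]]]:
--     """
--     Reorder models so that:
--       (1) label containing 'mref' or 'moe' or 'ours' first,
--       (2) label containing 'ft' and 'transformer' (or 'ftt') second,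
--       (3) label containing 'mlp' third,
--       (4) rest in original order.
--     """
--     def rank(lbl: str) -> int:
--         cl = _canonical_label(lbl)
--         if any(k in cl for k in ["mref", "moe", "ours"]):
--             return 0
--         if (("ft" in cl or "ftt" in cl) and "transformer" in cl) or "fttransformer" in cl or "ftt" in cl:
--             return 1
--         if "mlp" in cl:
--             return 2
--         return 3
--     idxs = list(range(len(labels)))
--     idxs_sorted = sorted(idxs, key=lambda i: (rank(labels[i]), i))
--     new_labels = [labels[i] for i in idxs_sorted]
--     new_inputs = [inputs[i] for i in idxs_sorted]
--     return new_labels, new_inputs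
-- ===== SOURCE B (Python) =====
-- import string
-- from typing import Tuple, List
--
-- def _canonical_label(label: str) -> str:
--     """Return a canonicalized version of the label for ordering."""
--     s = label.lower()
--     s = s.replace("-", "").replace("_", "")
--     s = "".join(ch for ch in s if ch not in string.punctuation and not ch.isspace())
--     return s
--
-- def _order_models(labels: List[str], inputs: List[List[str]]) -> Tuple[List[str], List[List[str]]]:
--     """Reorder models by category: stable 4-way bucket partition instead of a sort."""
--     def rank(lbl: str) -> int:
--         cl = _canonical_label(lbl)
--         if any(k in cl for k in ["mref", "moe", "ours"]):
--             return 0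
--         if (("ft" in cl or "ftt" in cl) and "transformer" in cl) or "fttransformer" in cl or "ftt" in cl:
--             return 1
--         if "mlp" in cl:
--             return 2
--         return 3
--     b0, b1, b2, b3 = [], [], [], []
--     for i in range(len(labels)):
--         r = rank(labels[i])
--         if r == 0:
--             b0.append(i)
--         elif r == 1:
--             b1.append(i)
--         elif r == 2:
--             b2.append(i)
--         else:
--             b3.append(i)
--     idxs_sorted = b0 + b1 + b2 + b3
--     new_labels = [labels[i] for i in idxs_sorted]
--     new_inputs = [inputs[i] for i in idxs_sorted]
--     return new_labels, new_inputs
-- ===== Notes on version B (the rewrite author's own statement) =====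
-- stated objective: alternative
-- what changed: Replaces the stable sort by key (rank, index) with a single-pass stable 4-bucket partition that appends each index to its rank's bucket and concatenates the buckets.
import Mathlib
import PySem

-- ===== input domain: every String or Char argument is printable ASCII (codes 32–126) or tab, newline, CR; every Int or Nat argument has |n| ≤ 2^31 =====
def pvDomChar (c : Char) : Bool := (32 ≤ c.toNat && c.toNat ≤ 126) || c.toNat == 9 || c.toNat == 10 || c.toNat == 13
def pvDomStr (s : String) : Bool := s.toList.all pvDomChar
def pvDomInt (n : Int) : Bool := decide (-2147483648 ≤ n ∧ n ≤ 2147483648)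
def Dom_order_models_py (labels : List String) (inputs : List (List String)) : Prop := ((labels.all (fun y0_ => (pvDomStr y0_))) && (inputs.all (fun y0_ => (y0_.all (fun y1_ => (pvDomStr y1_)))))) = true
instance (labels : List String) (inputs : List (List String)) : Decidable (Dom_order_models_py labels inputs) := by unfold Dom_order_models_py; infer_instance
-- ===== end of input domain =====

-- B replaces A's stable sort by key (rank, index) with a single-pass stable 4-bucket partition; same output.


-- ===== PORT A =====
-- string.punctuation, as a list of characters
def pvPunct : List Char := "!\"#$%&'()*+,-./:;<=>?@[\\]^_`{|}~".toList

-- port of _canonical_label (shared verbatim by A and B)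
def pvCanonical (label : List Char) : List Char :=
  let s1 := PySem.Chars.lower label
  let s2 := PySem.Chars.replace (PySem.Chars.replace s1 ['-'] []) ['_'] []
  s2.filter (fun ch => !(pvPunct.contains ch) && !(PySem.Chars.isspace ch))

-- port of the inner 'rank' helper (identical in A and B)
def pvRank (lbl : String) : Int :=
  let cl := pvCanonical lbl.toList
  if (["mref", "moe", "ours"] : List String).any (fun k => PySem.Chars.isIn k.toList cl) then 0
  else if ((PySem.Chars.isIn "ft".toList cl || PySem.Chars.isIn "ftt".toList cl) &&
            PySem.Chars.isIn "transformer".toList cl) ||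
          PySem.Chars.isIn "fttransformer".toList cl || PySem.Chars.isIn "ftt".toList cl then 1
  else if PySem.Chars.isIn "mlp".toList cl then 2
  else 3

def order_models_py (labels : List String) (inputs : List (List String)) : List String × List (List String) :=
  let idxs := PySem.List.pyRange 0 (PySem.List.len labels) 1
  let idxs_sorted := PySem.List.sorted2 idxs (fun i => pvRank (PySem.List.pyGetD labels i "")) (fun i => i)
  (idxs_sorted.map (fun i => PySem.List.pyGetD labels i ""),
   idxs_sorted.map (fun i => PySem.List.pyGetD inputs i []))

-- ===== PORT B =====
-- loop body of B's bucket pass: append i to the bucket of labels[i]'s rank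
def pvStep (labels : List String) (st : List Int × List Int × List Int × List Int) (i : Int) :
    List Int × List Int × List Int × List Int :=
  let r := pvRank (PySem.List.pyGetD labels i "")
  if r = 0 then (st.1 ++ [i], st.2.1, st.2.2.1, st.2.2.2)
  else if r = 1 then (st.1, st.2.1 ++ [i], st.2.2.1, st.2.2.2)
  else if r = 2 then (st.1, st.2.1, st.2.2.1 ++ [i], st.2.2.2)
  else (st.1, st.2.1, st.2.2.1, st.2.2.2 ++ [i])

def order_models_py_alt (labels : List String) (inputs : List (List String)) : List String × List (List String) :=
  let bs := (PySem.List.pyRange 0 (PySem.List.len labels) 1).foldl (pvStep labels) ([], [], [], [])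
  let idxs_sorted := bs.1 ++ bs.2.1 ++ bs.2.2.1 ++ bs.2.2.2
  (idxs_sorted.map (fun i => PySem.List.pyGetD labels i ""),
   idxs_sorted.map (fun i => PySem.List.pyGetD inputs i []))

-- ===== PRECONDITION & SPEC =====
-- Pre_ excludes exactly the inputs where A raises IndexError: fewer rows in `inputs` than in `labels`.
def Pre_order_models_py (labels : List String) (inputs : List (List String)) : Prop :=
  labels.length ≤ inputs.length
instance (labels : List String) (inputs : List (List String)) : Decidable (Pre_order_models_py labels inputs) := by unfold Pre_order_models_py; infer_instance

def pvWitness_order_models_py : List String × List (List String) :=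
  (["mlp", "xgb", "mref"], [["a"], ["b"], ["c"]])

def Spec_order_models_py (labels : List String) (inputs : List (List String)) (out : List String × List (List String)) : Prop := out = order_models_py_alt labels inputs
instance (labels : List String) (inputs : List (List String)) (out : List String × List (List String)) : Decidable (Spec_order_models_py labels inputs out) := by unfold Spec_order_models_py; infer_instance

-- ===== CLAIM (what is proved, stated in full; the proofs are below) =====
def Claim_equal_order_models_py : Prop := ∀ (labels : List String) (inputs : List (List String)), Dom_order_models_py labels inputs → Pre_order_models_py labels inputs → Spec_order_models_py labels inputs (order_models_py labels inputs)

-- ===== LEMMAS AND PROOFS =====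

-- the rank helper only returns 0, 1, 2 or 3
lemma pvRank_cases (l : String) : pvRank l = 0 ∨ pvRank l = 1 ∨ pvRank l = 2 ∨ pvRank l = 3 := by
  dsimp only [pvRank]
  split_ifs <;> simp

-- sorted2 with two integer keys is sorted with the lexicographic pair key
lemma pvSorted2_lex (xs : List Int) (k : Int → Int) :
    PySem.List.sorted2 xs k (fun i => i) =
      PySem.List.sorted xs (fun i => toLex (k i, i)) := by
  rw [PySem.List.sorted_eq_foldl_insertBy]
  have hb : (fun (a b : Int) => decide (k a < k b) || (!decide (k b < k a) && decide (a < b)))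
      = (fun (a b : Int) => decide (toLex (k a, a) < toLex (k b, b))) := by
    funext a b
    by_cases h1 : k a < k b <;> by_cases h2 : k b < k a <;> by_cases h3 : a < b <;>
      simp [h1, h2, h3, Prod.Lex.toLex_lt_toLex] <;> omega
  simp only [PySem.List.sorted2, hb, Bool.false_eq_true, if_false]

-- B's one-pass bucket fold computes the four rank-filters of the index list
lemma pvFold_buckets (labels : List String) (l : List Int) (b0 b1 b2 b3 : List Int) :
    l.foldl (pvStep labels) (b0, b1, b2, b3) =
      (b0 ++ l.filter (fun i => decide (pvRank (PySem.List.pyGetD labels i "") = 0)),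
       b1 ++ l.filter (fun i => decide (pvRank (PySem.List.pyGetD labels i "") = 1)),
       b2 ++ l.filter (fun i => decide (pvRank (PySem.List.pyGetD labels i "") = 2)),
       b3 ++ l.filter (fun i => decide (¬ pvRank (PySem.List.pyGetD labels i "") = 0 ∧
              ¬ pvRank (PySem.List.pyGetD labels i "") = 1 ∧
              ¬ pvRank (PySem.List.pyGetD labels i "") = 2))) := by
  induction l generalizing b0 b1 b2 b3 with
  | nil => simp
  | cons x t ih =>
    rcases pvRank_cases (PySem.List.pyGetD labels x "") with h | h | h | h <;>
      simp [List.foldl_cons, pvStep, h, ih]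

-- moving one element out of a 4-way concatenation, one lemma per bucket
lemma pvPermB {α : Type} {X Y Z W t : List α} (x : α) (h : (X ++ (Y ++ (Z ++ W))).Perm t) :
    (X ++ x :: (Y ++ (Z ++ W))).Perm (x :: t) := List.perm_middle.trans (h.cons x)

lemma pvPermC {α : Type} {X Y Z W t : List α} (x : α) (h : (X ++ (Y ++ (Z ++ W))).Perm t) :
    (X ++ (Y ++ x :: (Z ++ W))).Perm (x :: t) := by
  have e : X ++ (Y ++ x :: (Z ++ W)) = (X ++ Y) ++ x :: (Z ++ W) := by simp [List.append_assoc]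
  rw [e]
  refine List.perm_middle.trans (List.Perm.cons x ?_)
  simpa [List.append_assoc] using h

lemma pvPermD {α : Type} {X Y Z W t : List α} (x : α) (h : (X ++ (Y ++ (Z ++ W))).Perm t) :
    (X ++ (Y ++ (Z ++ x :: W))).Perm (x :: t) := by
  have e : X ++ (Y ++ (Z ++ x :: W)) = ((X ++ Y) ++ Z) ++ x :: W := by simp [List.append_assoc]
  rw [e]
  refine List.perm_middle.trans (List.Perm.cons x ?_)
  simpa [List.append_assoc] using h

-- the four rank-filters, concatenated, are a permutation of the list
lemma pvFilter4_perm (k : Int → Int) (l : List Int) :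
    (l.filter (fun i => decide (k i = 0)) ++ l.filter (fun i => decide (k i = 1)) ++
     l.filter (fun i => decide (k i = 2)) ++
     l.filter (fun i => decide (¬ k i = 0 ∧ ¬ k i = 1 ∧ ¬ k i = 2))).Perm l := by
  induction l with
  | nil => simp
  | cons x t ih =>
    norm_num [List.append_assoc] at ih
    by_cases h0 : k x = 0
    · simp only [List.filter_cons, h0]
      norm_num
      exact ih
    · by_cases h1 : k x = 1
      · simp only [List.filter_cons, h1]
        norm_num
        exact pvPermB x ih
      · by_cases h2 : k x = 2
        · simp only [List.filter_cons, h2]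
          norm_num
          exact pvPermC x ih
        · simp only [List.filter_cons, decide_eq_true_eq, if_neg h0, if_neg h1, if_neg h2,
            if_pos (show ¬ k x = 0 ∧ ¬ k x = 1 ∧ ¬ k x = 2 from ⟨h0, h1, h2⟩)]
          norm_num
          exact pvPermD x ih

-- concatenated rank-buckets are strictly increasing in the lexicographic key (rank, index)
lemma pvFilter4_pairwise (k : Int → Int) (hk : ∀ i, k i = 0 ∨ k i = 1 ∨ k i = 2 ∨ k i = 3)
    (l : List Int) (hl : l.Pairwise (· < ·)) :
    (l.filter (fun i => decide (k i = 0)) ++ l.filter (fun i => decide (k i = 1)) ++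
     l.filter (fun i => decide (k i = 2)) ++
     l.filter (fun i => decide (¬ k i = 0 ∧ ¬ k i = 1 ∧ ¬ k i = 2))).Pairwise
      (fun a b => toLex (k a, a) < toLex (k b, b)) := by
  have hmem : ∀ (p : Int → Bool) (a : Int), a ∈ l.filter p → p a = true :=
    fun p a ha => (List.mem_filter.mp ha).2
  have hsub : ∀ (p : Int → Bool), (l.filter p).Pairwise (· < ·) :=
    fun p => List.Pairwise.sublist List.filter_sublist hl
  have hwithin : ∀ (p : Int → Bool) (r : Int), (∀ a ∈ l.filter p, k a = r) →
      (l.filter p).Pairwise (fun a b => toLex (k a, a) < toLex (k b, b)) := by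
    intro p r h
    refine (hsub p).imp_of_mem ?_
    intro a b ha hb hab
    rw [Prod.Lex.toLex_lt_toLex]
    exact Or.inr ⟨by rw [h _ ha, h _ hb], hab⟩
  have h3 : ∀ a ∈ l.filter (fun i => decide (¬ k i = 0 ∧ ¬ k i = 1 ∧ ¬ k i = 2)), k a = 3 := by
    intro a ha
    have := hmem _ _ ha
    simp only [decide_eq_true_eq] at this
    rcases hk a with h | h | h | h <;> omega
  have hcross : ∀ (ra rb : Int) (pa pb : Int → Bool), ra < rb → (∀ a ∈ l.filter pa, k a = ra) →
      (∀ b ∈ l.filter pb, k b = rb) →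
      ∀ a ∈ l.filter pa, ∀ b ∈ l.filter pb, toLex (k a, a) < toLex (k b, b) := by
    intro ra rb pa pb hr hka hkb a ha b hb
    rw [Prod.Lex.toLex_lt_toLex]
    exact Or.inl (by rw [hka _ ha, hkb _ hb]; exact hr)
  have m0 : ∀ a ∈ l.filter (fun i => decide (k i = 0)), k a = 0 := by
    intro a ha; simpa using hmem _ _ ha
  have m1 : ∀ a ∈ l.filter (fun i => decide (k i = 1)), k a = 1 := by
    intro a ha; simpa using hmem _ _ ha
  have m2 : ∀ a ∈ l.filter (fun i => decide (k i = 2)), k a = 2 := by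
    intro a ha; simpa using hmem _ _ ha
  rw [List.pairwise_append, List.pairwise_append, List.pairwise_append]
  refine ⟨⟨⟨hwithin _ 0 m0, hwithin _ 1 m1, ?_⟩, hwithin _ 2 m2, ?_⟩, hwithin _ 3 h3, ?_⟩
  · exact hcross 0 1 _ _ (by norm_num) m0 m1
  · intro a ha b hb
    rcases List.mem_append.mp ha with ha' | ha'
    · exact hcross 0 2 _ _ (by norm_num) m0 m2 a ha' b hb
    · exact hcross 1 2 _ _ (by norm_num) m1 m2 a ha' b hb
  · intro a ha b hb
    rcases List.mem_append.mp ha with ha' | ha'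
    · rcases List.mem_append.mp ha' with ha'' | ha''
      · exact hcross 0 3 _ _ (by norm_num) m0 h3 a ha'' b hb
      · exact hcross 1 3 _ _ (by norm_num) m1 h3 a ha'' b hb
    · exact hcross 2 3 _ _ (by norm_num) m2 h3 a ha' b hb

-- A's stable sort by (rank, index) equals B's concatenated buckets
lemma pvSorted_eq_buckets (labels : List String) :
    PySem.List.sorted2 (PySem.List.pyRange 0 (PySem.List.len labels) 1)
        (fun i => pvRank (PySem.List.pyGetD labels i "")) (fun i => i) =
      (PySem.List.pyRange 0 (PySem.List.len labels) 1).filter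
          (fun i => decide (pvRank (PySem.List.pyGetD labels i "") = 0)) ++
        (PySem.List.pyRange 0 (PySem.List.len labels) 1).filter
          (fun i => decide (pvRank (PySem.List.pyGetD labels i "") = 1)) ++
        (PySem.List.pyRange 0 (PySem.List.len labels) 1).filter
          (fun i => decide (pvRank (PySem.List.pyGetD labels i "") = 2)) ++
        (PySem.List.pyRange 0 (PySem.List.len labels) 1).filter
          (fun i => decide (¬ pvRank (PySem.List.pyGetD labels i "") = 0 ∧
            ¬ pvRank (PySem.List.pyGetD labels i "") = 1 ∧
            ¬ pvRank (PySem.List.pyGetD labels i "") = 2)) := by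
  rw [pvSorted2_lex]
  exact PySem.List.sorted_eq_of_perm_of_pairwise_lt _ _ _
    (pvFilter4_perm _ _)
    (pvFilter4_pairwise _ (fun i => pvRank_cases _) _
      (PySem.List.pairwise_lt_pyRange_one 0 (PySem.List.len labels)))

-- ===== VERDICT (by name: the statement is the Claim_ definition above) =====
theorem order_models_py_spec : Claim_equal_order_models_py := by
  intro labels inputs _ _
  unfold Spec_order_models_py order_models_py order_models_py_alt
  dsimp only
  rw [pvFold_buckets, pvSorted_eq_buckets]
  simp [List.append_assoc]
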